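-- pv_equiv track=rewrite | github.com/Parthi10/hackerrank | algorithm/challenges/even_tree1.py | countChildrenEdges
-- ===== SOURCE A (Python) =====
-- def countChildrenEdges(graph, node):
--     count = 0
--     childNodes = graph[node]
--     for i in childNodes:
--         if i in graph.keys():
--             count += countChildrenEdges(graph,i)
--     count += len(childNodes)
--     return count
-- ===== SOURCE B (Python) =====
-- def countChildrenEdges(graph, node):
--     memo = {}
--
--     def walk(n):
--         if n in memo:
--             return memo[n]
--         children = graph[n]
--         total = len(children)
--         for c in children:
--             if c in graph:
--                 total += walk(c)
--         memo[n] = total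
--         return total
--
--     return walk(node)
-- ===== Notes on version B (the rewrite author's own statement) =====
-- stated objective: faster
-- what changed: B memoizes the per-node edge count in a dict so every node is computed once, instead of A's plain recursion that re-walks shared subtrees on every visit.
import Mathlib
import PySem

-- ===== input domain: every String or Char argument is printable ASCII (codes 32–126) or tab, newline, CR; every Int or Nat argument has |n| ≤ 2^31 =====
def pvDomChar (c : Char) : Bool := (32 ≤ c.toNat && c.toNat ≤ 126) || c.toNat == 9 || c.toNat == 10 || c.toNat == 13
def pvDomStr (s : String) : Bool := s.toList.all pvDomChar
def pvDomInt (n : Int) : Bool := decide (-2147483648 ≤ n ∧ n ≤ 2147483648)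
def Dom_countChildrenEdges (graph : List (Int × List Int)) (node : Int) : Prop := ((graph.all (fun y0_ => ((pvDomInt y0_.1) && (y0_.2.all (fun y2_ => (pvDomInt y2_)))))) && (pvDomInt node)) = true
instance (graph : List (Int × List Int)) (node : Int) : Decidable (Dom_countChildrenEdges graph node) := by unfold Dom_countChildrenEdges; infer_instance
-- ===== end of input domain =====

-- B changes the algorithm: it memoizes each node's edge count in a dict so every node is
-- computed once, where A re-walks shared subtrees on every visit. Both ports are fuel-guarded
-- (depth fuel graph.length+1, sufficient on Pre_'s acyclic inputs); equivalence is about the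
-- return value only.

-- ===== PORT A =====
-- one loop-body step of A's `for i in childNodes` (acc = count so far; none = exception pending)
def foldA (graph : List (Int × List Int)) (rec : Int → Option Int)
    (acc : Option Int) (i : Int) : Option Int :=
  if (PySem.Dict.mk graph).contains i then
    match acc, rec i with
    | some c, some v => some (c + v)
    | _, _ => none
  else acc

-- A's recursion, fuel-guarded (none = KeyError or fuel exhausted; fuel never runs out on Pre_)
def cceAux (graph : List (Int × List Int)) : Nat → Int → Option Int
  | 0, _ => none
  | fuel+1, node =>
    match (PySem.Dict.mk graph).get? node with
    | none => none
    | some childNodes =>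
      (childNodes.foldl (foldA graph (fun i => cceAux graph fuel i)) (some 0)).map
        (fun c => c + (childNodes.length : Int))

def countChildrenEdges (graph : List (Int × List Int)) (node : Int) : Int :=
  (cceAux graph (graph.length + 1) node).getD 0

-- ===== PORT B =====
-- one loop-body step of B's `for c in children` (acc = (total, memo); none = exception pending)
def foldB (graph : List (Int × List Int))
    (rec : Int → PySem.Dict Int Int → Option (Int × PySem.Dict Int Int))
    (acc : Option (Int × PySem.Dict Int Int)) (c : Int) : Option (Int × PySem.Dict Int Int) :=
  match acc with
  | none => none
  | some (t, m) =>
    if (PySem.Dict.mk graph).contains c then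
      match rec c m with
      | none => none
      | some (v, m') => some (t + v, m')
    else some (t, m)

-- B's memoized walk, fuel-guarded like A's
def walkAux (graph : List (Int × List Int)) :
    Nat → Int → PySem.Dict Int Int → Option (Int × PySem.Dict Int Int)
  | 0, _, _ => none
  | fuel+1, n, memo =>
    match memo.get? n with
    | some v => some (v, memo)
    | none =>
      match (PySem.Dict.mk graph).get? n with
      | none => none
      | some children =>
        match children.foldl (foldB graph (fun c m => walkAux graph fuel c m))
            (some ((children.length : Int), memo)) with
        | none => none
        | some (total, m) => some (total, m.insert n total)

def countChildrenEdges_alt (graph : List (Int × List Int)) (node : Int) : Int :=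
  ((walkAux graph (graph.length + 1) node PySem.Dict.empty).map Prod.fst).getD 0

-- ===== PRECONDITION & SPEC =====
-- helpers for Pre_: the key-edge relation A recurses along, and bounded strict reachability
def childrenOf (graph : List (Int × List Int)) (n : Int) : List Int :=
  ((PySem.Dict.mk graph).get? n).getD []

def reachS (graph : List (Int × List Int)) : Nat → Int → Int → Bool
  | 0, _, _ => false
  | m+1, a, b =>
    (childrenOf graph a).any
      (fun c => (PySem.Dict.mk graph).contains c && (c == b || reachS graph m c b))

-- Pre_ = exactly where Python A returns: node is a key, and no key-cycle is reachable from
-- node along key-edges (on a reachable cycle A raises RecursionError; on a missing node, KeyError)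
def Pre_countChildrenEdges (graph : List (Int × List Int)) (node : Int) : Prop :=
  (PySem.Dict.mk graph).contains node = true ∧
  ∀ k ∈ graph.map Prod.fst,
    (k = node ∨ reachS graph (graph.length + 1) node k = true) →
    reachS graph (graph.length + 1) k k = false

instance (graph : List (Int × List Int)) (node : Int) : Decidable (Pre_countChildrenEdges graph node) := by
  unfold Pre_countChildrenEdges; infer_instance

def pvWitness_countChildrenEdges : (List (Int × List Int)) × Int :=
  ([(0, [1, 2]), (1, []), (2, [1, 5])], 0)

def Spec_countChildrenEdges (graph : List (Int × List Int)) (node : Int) (out : Int) : Prop := out = countChildrenEdges_alt graph node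
instance (graph : List (Int × List Int)) (node : Int) (out : Int) : Decidable (Spec_countChildrenEdges graph node out) := by unfold Spec_countChildrenEdges; infer_instance

-- ===== CLAIM (what is proved, stated in full; the proofs are below) =====
def Claim_equal_countChildrenEdges : Prop := ∀ (graph : List (Int × List Int)) (node : Int), Dom_countChildrenEdges graph node → Pre_countChildrenEdges graph node → Spec_countChildrenEdges graph node (countChildrenEdges graph node)

-- ===== LEMMAS AND PROOFS =====

-- the key-edge relation A recurses along (proof-only helper)
def stepB (graph : List (Int × List Int)) (a b : Int) : Bool :=
  match (PySem.Dict.mk graph).get? a with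
  | none => false
  | some ch => ch.contains b && (PySem.Dict.mk graph).contains b


-- membership in keys
theorem pv_contains_iff (graph : List (Int × List Int)) (n : Int) :
    (PySem.Dict.mk graph).contains n = true ↔ n ∈ graph.map Prod.fst := by
  rw [PySem.Dict.contains_iff_mem_keys]
  simp [PySem.Dict.keys]

theorem pv_contains_get? (graph : List (Int × List Int)) (n : Int)
    (h : (PySem.Dict.mk graph).contains n = true) :
    ∃ ch, (PySem.Dict.mk graph).get? n = some ch := by
  rw [PySem.Dict.contains_eq_isSome_get?] at h
  exact Option.isSome_iff_exists.mp h

-- reachS is monotone in fuel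
theorem reachS_mono (graph : List (Int × List Int)) :
    ∀ m a b, reachS graph m a b = true → reachS graph (m+1) a b = true := by
  intro m
  induction m with
  | zero => intro a b h; simp [reachS] at h
  | succ m ih =>
    intro a b h
    rw [reachS] at h ⊢
    simp only [List.any_eq_true, Bool.and_eq_true, Bool.or_eq_true] at h ⊢
    obtain ⟨c, hc, hcon, hor⟩ := h
    exact ⟨c, hc, hcon, hor.imp id (ih c b)⟩

theorem reachS_mono_le (graph : List (Int × List Int)) {m m' : Nat} (h : m ≤ m') :
    ∀ a b, reachS graph m a b = true → reachS graph m' a b = true := by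
  induction m', h using Nat.le_induction with
  | base => exact fun a b hr => hr
  | succ k hk ih => exact fun a b hr => reachS_mono graph k a b (ih a b hr)

theorem step_reachS (graph : List (Int × List Int)) {a b : Int}
    (h : stepB graph a b = true) : reachS graph 1 a b = true := by
  unfold stepB at h
  cases hga : (PySem.Dict.mk graph).get? a with
  | none => rw [hga] at h; simp at h
  | some ch =>
    rw [hga] at h
    simp only [Bool.and_eq_true] at h
    simp only [reachS, childrenOf, hga, Option.getD_some, List.any_eq_true,
      Bool.and_eq_true, Bool.or_eq_true]
    refine ⟨b, ?_, h.2, Or.inl (by simp)⟩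
    have := h.1
    simpa using this

theorem reachS_snoc (graph : List (Int × List Int)) :
    ∀ m a b d, reachS graph m a b = true → stepB graph b d = true →
    reachS graph (m+1) a d = true := by
  intro m
  induction m with
  | zero => intro a b d h; simp [reachS] at h
  | succ m ih =>
    intro a b d h hs
    rw [reachS] at h ⊢
    simp only [List.any_eq_true, Bool.and_eq_true, Bool.or_eq_true] at h ⊢
    obtain ⟨c, hc, hcon, hor⟩ := h
    refine ⟨c, hc, hcon, Or.inr ?_⟩
    cases hor with
    | inl hcb =>
      have hcb' : c = b := by simpa using hcb
      subst hcb'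
      exact reachS_mono_le graph (by omega) c d (step_reachS graph hs)
    | inr hr => exact ih c b d hr hs

-- call paths from the root
def pathFrom (graph : List (Int × List Int)) (root : Int) : List Int → Int → Prop
  | [], n => n = root
  | p :: rest, n => stepB graph p n = true ∧ pathFrom graph root rest p

theorem pathFrom_reach (graph : List (Int × List Int)) (root : Int) :
    ∀ seen n, pathFrom graph root seen n →
    n = root ∨ reachS graph seen.length root n = true := by
  intro seen
  induction seen with
  | nil => intro n h; exact Or.inl h
  | cons p rest ih =>
    intro n h
    obtain ⟨hstep, hpath⟩ := h
    right
    cases ih p hpath with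
    | inl hp =>
      rw [hp] at hstep
      exact reachS_mono_le graph (by simp) root n (step_reachS graph hstep)
    | inr hr => exact reachS_snoc graph rest.length root p n hr hstep

theorem pathFrom_mem_reach (graph : List (Int × List Int)) (root : Int) :
    ∀ seen n c, pathFrom graph root seen n → c ∈ seen →
    ∃ m ≤ seen.length, reachS graph m c n = true := by
  intro seen
  induction seen with
  | nil => intro n c _ hc; simp at hc
  | cons p rest ih =>
    intro n c h hc
    obtain ⟨hstep, hpath⟩ := h
    rcases List.mem_cons.mp hc with hcp | hcr
    · subst hcp
      exact ⟨1, by simp, step_reachS graph hstep⟩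
    · obtain ⟨m, hm, hr⟩ := ih p c hpath hcr
      exact ⟨m + 1, by simpa using hm, reachS_snoc graph m c p n hr hstep⟩

theorem pathFrom_keys (graph : List (Int × List Int)) (root : Int) :
    ∀ seen n, pathFrom graph root seen n → ∀ s ∈ seen, s ∈ graph.map Prod.fst := by
  intro seen
  induction seen with
  | nil => intro n _ s hs; simp at hs
  | cons p rest ih =>
    intro n h s hs
    obtain ⟨hstep, hpath⟩ := h
    rcases List.mem_cons.mp hs with hsp | hsr
    · subst hsp
      unfold stepB at hstep
      cases hga : (PySem.Dict.mk graph).get? s with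
      | none => rw [hga] at hstep; simp at hstep
      | some ch =>
        have : (PySem.Dict.mk graph).contains s = true := by
          rw [PySem.Dict.contains_eq_isSome_get?, hga]; rfl
        exact (pv_contains_iff graph s).mp this
    · exact ih p hpath s hsr

theorem seen_length_le (graph : List (Int × List Int)) (seen : List Int)
    (hnd : seen.Nodup) (hsub : ∀ s ∈ seen, s ∈ graph.map Prod.fst) :
    seen.length ≤ graph.length := by
  have hsp : List.Subperm seen (graph.map Prod.fst) :=
    List.subperm_of_subset hnd (fun s hs => hsub s hs)
  have := hsp.length_le
  simpa using this

-- the cycle argument: a child already on the call path contradicts Pre_'s acyclicity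
theorem pv_no_revisit (graph : List (Int × List Int)) (node : Int)
    (hacyc : ∀ k ∈ graph.map Prod.fst,
      (k = node ∨ reachS graph (graph.length + 1) node k = true) →
      reachS graph (graph.length + 1) k k = false)
    (seen : List Int) (n c : Int)
    (hnd : seen.Nodup) (hpath : pathFrom graph node seen n)
    (hstep : stepB graph n c = true) (hmem : c ∈ n :: seen) : False := by
  -- c is a key
  have hck : (PySem.Dict.mk graph).contains c = true := by
    unfold stepB at hstep
    cases hga : (PySem.Dict.mk graph).get? n with
    | none => rw [hga] at hstep; simp at hstep
    | some ch => rw [hga] at hstep; exact (Bool.and_eq_true _ _).mp hstep |>.2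
  have hckm : c ∈ graph.map Prod.fst := (pv_contains_iff graph c).mp hck
  -- the path members are keys, so seen is short
  have hsub : ∀ s ∈ seen, s ∈ graph.map Prod.fst := pathFrom_keys graph node seen n hpath
  have hlen : seen.length ≤ graph.length := seen_length_le graph seen hnd hsub
  -- c is reachable from node
  have hguard : reachS graph (graph.length + 1) node c = true := by
    cases pathFrom_reach graph node seen n hpath with
    | inl hn =>
      subst hn
      exact reachS_mono_le graph (by omega) n c (step_reachS graph hstep)
    | inr hr =>
      exact reachS_mono_le graph (by omega) node c
        (reachS_snoc graph seen.length node n c hr hstep)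
  -- a cycle at c
  have hcyc : reachS graph (graph.length + 1) c c = true := by
    rcases List.mem_cons.mp hmem with hcn | hcs
    · subst hcn
      exact reachS_mono_le graph (by omega) c c (step_reachS graph hstep)
    · obtain ⟨m, hm, hr⟩ := pathFrom_mem_reach graph node seen n c hpath hcs
      exact reachS_mono_le graph (by omega) c c (reachS_snoc graph m c n c hr hstep)
  have := hacyc c hckm (Or.inr hguard)
  rw [this] at hcyc
  exact Bool.false_ne_true hcyc

-- A's loop never recovers from a pending exception
theorem foldA_none (graph : List (Int × List Int)) (rec : Int → Option Int) :
    ∀ l : List Int, l.foldl (foldA graph rec) none = none := by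
  intro l
  induction l with
  | nil => rfl
  | cons i t ih =>
    have h : foldA graph rec none i = none := by
      unfold foldA
      split
      · cases rec i <;> rfl
      · rfl
    rw [List.foldl_cons, h]; exact ih

theorem foldA_isSome (graph : List (Int × List Int)) (rec : Int → Option Int) :
    ∀ (l : List Int) (acc : Option Int), acc.isSome →
    (∀ c ∈ l, (PySem.Dict.mk graph).contains c = true → (rec c).isSome) →
    (l.foldl (foldA graph rec) acc).isSome := by
  intro l
  induction l with
  | nil => intro acc hacc _; exact hacc
  | cons c t ih =>
    intro acc hacc hrec
    rw [List.foldl_cons]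
    refine ih (foldA graph rec acc c) ?_ (fun x hx => hrec x (List.mem_cons_of_mem _ hx))
    obtain ⟨a, ha⟩ := Option.isSome_iff_exists.mp hacc
    subst ha
    unfold foldA
    split
    · rename_i hc
      obtain ⟨v, hv⟩ := Option.isSome_iff_exists.mp (hrec c (List.mem_cons_self) hc)
      rw [hv]; rfl
    · rfl

theorem foldA_congr (graph : List (Int × List Int)) (rec rec' : Int → Option Int)
    (h : ∀ c v, rec c = some v → rec' c = some v) :
    ∀ (l : List Int) (acc : Option Int) (r : Int),
    l.foldl (foldA graph rec) acc = some r → l.foldl (foldA graph rec') acc = some r := by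
  intro l
  induction l with
  | nil => intro acc r hr; exact hr
  | cons c t ih =>
    intro acc r hr
    rw [List.foldl_cons] at hr ⊢
    cases acc with
    | none =>
      exfalso
      have hn : foldA graph rec none c = none := by
        unfold foldA
        split
        · cases rec c <;> rfl
        · rfl
      rw [hn, foldA_none] at hr
      exact absurd hr (by simp)
    | some a =>
      by_cases hc : (PySem.Dict.mk graph).contains c = true
      · cases hrc : rec c with
        | none =>
          have : foldA graph rec (some a) c = none := by unfold foldA; rw [if_pos hc, hrc]
          rw [this, foldA_none] at hr
          exact absurd hr (by simp)
        | some v =>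
          have h1 : foldA graph rec (some a) c = some (a + v) := by
            unfold foldA; rw [if_pos hc, hrc]
          have h2 : foldA graph rec' (some a) c = some (a + v) := by
            unfold foldA; rw [if_pos hc, h c v hrc]
          rw [h1] at hr; rw [h2]
          exact ih _ _ hr
      · have h1 : foldA graph rec (some a) c = some a := by
          unfold foldA; rw [if_neg hc]
        have h2 : foldA graph rec' (some a) c = some a := by
          unfold foldA; rw [if_neg hc]
        rw [h1] at hr; rw [h2]
        exact ih _ _ hr

-- fuel monotonicity for A's recursion
theorem cceAux_mono (graph : List (Int × List Int)) :
    ∀ fuel n v, cceAux graph fuel n = some v → cceAux graph (fuel+1) n = some v := by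
  intro fuel
  induction fuel with
  | zero => intro n v h; simp [cceAux] at h
  | succ f ih =>
    intro n v h
    rw [cceAux] at h ⊢
    cases hg : (PySem.Dict.mk graph).get? n with
    | none => rw [hg] at h; exact absurd h (by simp)
    | some ch =>
      rw [hg] at h
      obtain ⟨r, hr, hv⟩ := Option.map_eq_some_iff.mp h
      rw [Option.map_eq_some_iff]
      exact ⟨r, foldA_congr graph _ _ (fun c v' hc => ih c v' hc) ch (some 0) r hr, hv⟩

theorem cceAux_mono_le (graph : List (Int × List Int)) {m m' : Nat} (h : m ≤ m') :
    ∀ n v, cceAux graph m n = some v → cceAux graph m' n = some v := by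
  induction m', h using Nat.le_induction with
  | base => exact fun n v hv => hv
  | succ k hk ih => exact fun n v hv => cceAux_mono graph k n v (ih n v hv)

theorem cceAux_unique (graph : List (Int × List Int)) {m m' : Nat} {n v v' : Int}
    (h : cceAux graph m n = some v) (h' : cceAux graph m' n = some v') : v = v' := by
  have h1 := cceAux_mono_le graph (Nat.le_max_left m m') n v h
  have h2 := cceAux_mono_le graph (Nat.le_max_right m m') n v' h'
  rw [h1] at h2
  exact Option.some.inj h2

-- fuel graph.length+1 suffices for A on acyclic inputs (DFS paths cannot repeat keys)
theorem cceAux_isSome (graph : List (Int × List Int)) (node : Int)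
    (hacyc : ∀ k ∈ graph.map Prod.fst,
      (k = node ∨ reachS graph (graph.length + 1) node k = true) →
      reachS graph (graph.length + 1) k k = false) :
    ∀ (fuel : Nat) (seen : List Int) (n : Int), seen.Nodup →
    pathFrom graph node seen n → n ∉ seen →
    (PySem.Dict.mk graph).contains n = true →
    graph.length + 1 ≤ fuel + seen.length →
    (cceAux graph fuel n).isSome := by
  intro fuel
  induction fuel with
  | zero =>
    intro seen n hnd hpath hns hcn hf
    exfalso
    have hsub : ∀ s ∈ n :: seen, s ∈ graph.map Prod.fst := by
      intro s hs
      rcases List.mem_cons.mp hs with hsn | hss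
      · subst hsn; exact (pv_contains_iff graph s).mp hcn
      · exact pathFrom_keys graph node seen n hpath s hss
    have hlen := seen_length_le graph (n :: seen) (List.nodup_cons.mpr ⟨hns, hnd⟩) hsub
    simp at hlen
    omega
  | succ f ih =>
    intro seen n hnd hpath hns hcn hf
    obtain ⟨ch, hch⟩ := pv_contains_get? graph n hcn
    rw [cceAux, hch, Option.isSome_map]
    refine foldA_isSome graph _ ch (some 0) rfl ?_
    intro c hc hcont
    have hstep : stepB graph n c = true := by
      unfold stepB; rw [hch]
      exact Bool.and_eq_true _ _ |>.mpr ⟨by simpa using hc, hcont⟩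
    have hcns : c ∉ n :: seen := fun hmem =>
      pv_no_revisit graph node hacyc seen n c hnd hpath hstep hmem
    exact ih (n :: seen) c (List.nodup_cons.mpr ⟨hns, hnd⟩) ⟨hstep, hpath⟩ hcns hcont
      (by simp at hf ⊢; omega)

-- B's loop never recovers from a pending exception
theorem foldB_none (graph : List (Int × List Int))
    (rec : Int → PySem.Dict Int Int → Option (Int × PySem.Dict Int Int)) :
    ∀ l : List Int, l.foldl (foldB graph rec) none = none := by
  intro l
  induction l with
  | nil => rfl
  | cons i t ih => rw [List.foldl_cons]; exact ih

theorem foldB_isSome (graph : List (Int × List Int))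
    (rec : Int → PySem.Dict Int Int → Option (Int × PySem.Dict Int Int)) :
    ∀ (l : List Int) (acc : Option (Int × PySem.Dict Int Int)), acc.isSome →
    (∀ c ∈ l, (PySem.Dict.mk graph).contains c = true → ∀ m, (rec c m).isSome) →
    (l.foldl (foldB graph rec) acc).isSome := by
  intro l
  induction l with
  | nil => intro acc hacc _; exact hacc
  | cons c t ih =>
    intro acc hacc hrec
    rw [List.foldl_cons]
    refine ih (foldB graph rec acc c) ?_ (fun x hx => hrec x (List.mem_cons_of_mem _ hx))
    obtain ⟨⟨a, m⟩, ha⟩ := Option.isSome_iff_exists.mp hacc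
    subst ha
    unfold foldB
    simp only
    split
    · rename_i hc
      obtain ⟨⟨v, m'⟩, hv⟩ := Option.isSome_iff_exists.mp (hrec c (List.mem_cons_self) hc m)
      rw [hv]; rfl
    · rfl

-- fuel graph.length+1 suffices for B (memo hits only shorten paths)
theorem walkAux_isSome (graph : List (Int × List Int)) (node : Int)
    (hacyc : ∀ k ∈ graph.map Prod.fst,
      (k = node ∨ reachS graph (graph.length + 1) node k = true) →
      reachS graph (graph.length + 1) k k = false) :
    ∀ (fuel : Nat) (seen : List Int) (n : Int) (memo : PySem.Dict Int Int), seen.Nodup →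
    pathFrom graph node seen n → n ∉ seen →
    (PySem.Dict.mk graph).contains n = true →
    graph.length + 1 ≤ fuel + seen.length →
    (walkAux graph fuel n memo).isSome := by
  intro fuel
  induction fuel with
  | zero =>
    intro seen n memo hnd hpath hns hcn hf
    exfalso
    have hsub : ∀ s ∈ n :: seen, s ∈ graph.map Prod.fst := by
      intro s hs
      rcases List.mem_cons.mp hs with hsn | hss
      · subst hsn; exact (pv_contains_iff graph s).mp hcn
      · exact pathFrom_keys graph node seen n hpath s hss
    have hlen := seen_length_le graph (n :: seen) (List.nodup_cons.mpr ⟨hns, hnd⟩) hsub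
    simp at hlen
    omega
  | succ f ih =>
    intro seen n memo hnd hpath hns hcn hf
    rw [walkAux]
    cases hm : memo.get? n with
    | some v => simp
    | none =>
      obtain ⟨ch, hch⟩ := pv_contains_get? graph n hcn
      rw [hch]
      have hfold : (ch.foldl (foldB graph (fun c m => walkAux graph f c m))
          (some ((ch.length : Int), memo))).isSome := by
        refine foldB_isSome graph _ ch _ rfl ?_
        intro c hc hcont m
        have hstep : stepB graph n c = true := by
          unfold stepB; rw [hch]
          exact Bool.and_eq_true _ _ |>.mpr ⟨by simpa using hc, hcont⟩
        have hcns : c ∉ n :: seen := fun hmem =>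
          pv_no_revisit graph node hacyc seen n c hnd hpath hstep hmem
        exact ih (n :: seen) c m (List.nodup_cons.mpr ⟨hns, hnd⟩) ⟨hstep, hpath⟩ hcns hcont
          (by simp at hf ⊢; omega)
      obtain ⟨⟨t, m⟩, htm⟩ := Option.isSome_iff_exists.mp hfold
      simp [htm]

-- "v is the limit value of A's recursion at n" and the memo invariant
def cceVal (graph : List (Int × List Int)) (n v : Int) : Prop :=
  ∃ M, cceAux graph M n = some v

def InvM (graph : List (Int × List Int)) (memo : PySem.Dict Int Int) : Prop :=
  ∀ k v, memo.get? k = some v → cceVal graph k v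

-- B's inner loop computes the same partial sums as A's, and preserves the memo invariant
theorem foldB_eq (graph : List (Int × List Int))
    (rec : Int → PySem.Dict Int Int → Option (Int × PySem.Dict Int Int))
    (hrec : ∀ c m v m', InvM graph m → rec c m = some (v, m') →
      cceVal graph c v ∧ InvM graph m') :
    ∀ (l : List Int) (t0 : Int) (m0 : PySem.Dict Int Int) (t : Int) (m : PySem.Dict Int Int),
    InvM graph m0 →
    l.foldl (foldB graph rec) (some (t0, m0)) = some (t, m) →
    InvM graph m ∧
      ∃ M, ∀ s : Int, l.foldl (foldA graph (fun i => cceAux graph M i)) (some s)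
        = some (s + (t - t0)) := by
  intro l
  induction l with
  | nil =>
    intro t0 m0 t m hinv h
    simp only [List.foldl_nil, Option.some.injEq, Prod.mk.injEq] at h
    obtain ⟨ht, hm⟩ := h
    subst ht; subst hm
    exact ⟨hinv, 0, fun s => by simp⟩
  | cons c l ih =>
    intro t0 m0 t m hinv h
    rw [List.foldl_cons] at h
    by_cases hc : (PySem.Dict.mk graph).contains c = true
    · cases hrc : rec c m0 with
      | none =>
        have hn : foldB graph rec (some (t0, m0)) c = none := by
          unfold foldB; simp only; rw [if_pos hc, hrc]
        rw [hn, foldB_none] at h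
        exact absurd h (by simp)
      | some vm =>
        obtain ⟨vc, m1⟩ := vm
        have hs : foldB graph rec (some (t0, m0)) c = some (t0 + vc, m1) := by
          unfold foldB; simp only; rw [if_pos hc, hrc]
        rw [hs] at h
        obtain ⟨⟨Mc, hMc⟩, hinv1⟩ := hrec c m0 vc m1 hinv hrc
        obtain ⟨hinvm, Mr, hMr⟩ := ih (t0 + vc) m1 t m hinv1 h
        refine ⟨hinvm, max Mc Mr, fun s => ?_⟩
        rw [List.foldl_cons]
        have h1 : foldA graph (fun i => cceAux graph (max Mc Mr) i) (some s) c
            = some (s + vc) := by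
          unfold foldA
          rw [if_pos hc]
          simp only [cceAux_mono_le graph (Nat.le_max_left Mc Mr) c vc hMc]
        rw [h1]
        have h2 := foldA_congr graph (fun i => cceAux graph Mr i)
          (fun i => cceAux graph (max Mc Mr) i)
          (fun i v hv => cceAux_mono_le graph (Nat.le_max_right Mc Mr) i v hv)
          l (some (s + vc)) ((s + vc) + (t - (t0 + vc))) (hMr (s + vc))
        rw [h2]
        congr 1
        ring
    · have hs : foldB graph rec (some (t0, m0)) c = some (t0, m0) := by
        unfold foldB; simp only; rw [if_neg hc]
      rw [hs] at h
      obtain ⟨hinvm, Mr, hMr⟩ := ih t0 m0 t m hinv h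
      refine ⟨hinvm, Mr, fun s => ?_⟩
      rw [List.foldl_cons]
      have h1 : foldA graph (fun i => cceAux graph Mr i) (some s) c = some s := by
        unfold foldA; rw [if_neg hc]
      rw [h1]
      exact hMr s

-- B's walk returns A's limit value and preserves the memo invariant
theorem walkAux_main (graph : List (Int × List Int)) :
    ∀ (fuel : Nat) (n : Int) (memo : PySem.Dict Int Int) (v : Int)
      (memo' : PySem.Dict Int Int),
    InvM graph memo → walkAux graph fuel n memo = some (v, memo') →
    cceVal graph n v ∧ InvM graph memo' := by
  intro fuel
  induction fuel with
  | zero => intro n memo v memo' _ h; simp [walkAux] at h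
  | succ f ih =>
    intro n memo v memo' hinv h
    rw [walkAux] at h
    cases hm : memo.get? n with
    | some v0 =>
      rw [hm] at h
      simp only [Option.some.injEq, Prod.mk.injEq] at h
      obtain ⟨hv, hmm⟩ := h
      subst hv; subst hmm
      exact ⟨hinv n v0 hm, hinv⟩
    | none =>
      rw [hm] at h
      cases hg : (PySem.Dict.mk graph).get? n with
      | none => rw [hg] at h; simp at h
      | some ch =>
        rw [hg] at h
        have h' : (match ch.foldl (foldB graph (fun c m => walkAux graph f c m))
              (some ((ch.length : Int), memo)) with
            | none => none
            | some (total, m) => some (total, m.insert n total)) = some (v, memo') := h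
        clear h
        cases hfold : ch.foldl (foldB graph (fun c m => walkAux graph f c m))
            (some ((ch.length : Int), memo)) with
        | none => rw [hfold] at h'; simp at h'
        | some tm =>
          obtain ⟨t, m⟩ := tm
          rw [hfold] at h'
          have h : some (t, m.insert n t) = some (v, memo') := h'
          simp only [Option.some.injEq, Prod.mk.injEq] at h
          obtain ⟨hv, hmm⟩ := h
          subst hv; subst hmm
          obtain ⟨hinvm, M, hM⟩ := foldB_eq graph _
            (fun c m v m' hi hw => ih c m v m' hi hw)
            ch (ch.length : Int) memo t m hinv hfold
          have hval : cceVal graph n t := by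
            refine ⟨M + 1, ?_⟩
            rw [cceAux, hg]
            show (ch.foldl (foldA graph fun i => cceAux graph M i) (some 0)).map
                (fun c => c + (ch.length : Int)) = some t
            rw [hM 0, Option.map_some]
            congr 1
            ring
          refine ⟨hval, ?_⟩
          intro k v' hk
          by_cases hkn : k = n
          · subst hkn
            rw [PySem.Dict.get?_insert_self] at hk
            exact Option.some.inj hk ▸ hval
          · rw [PySem.Dict.get?_insert_of_ne _ _ hkn] at hk
            exact hinvm k v' hk

-- ===== VERDICT (by name: the statement is the Claim_ definition above) =====
theorem countChildrenEdges_spec : Claim_equal_countChildrenEdges := by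
  intro graph node _ hpre
  obtain ⟨hnode, hacyc⟩ := hpre
  unfold Spec_countChildrenEdges countChildrenEdges countChildrenEdges_alt
  have hA := cceAux_isSome graph node hacyc (graph.length + 1) [] node List.nodup_nil
    rfl (by simp) hnode (by omega)
  obtain ⟨vA, hvA⟩ := Option.isSome_iff_exists.mp hA
  have hB := walkAux_isSome graph node hacyc (graph.length + 1) [] node PySem.Dict.empty
    List.nodup_nil rfl (by simp) hnode (by omega)
  obtain ⟨⟨vB, m'⟩, hvB⟩ := Option.isSome_iff_exists.mp hB
  have hinv : InvM graph PySem.Dict.empty := by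
    intro k v h
    rw [PySem.Dict.get?_empty] at h
    cases h
  obtain ⟨⟨M, hM⟩, _⟩ := walkAux_main graph (graph.length + 1) node PySem.Dict.empty vB m'
    hinv hvB
  have hvv : vA = vB := cceAux_unique graph hvA hM
  rw [hvA, hvB, hvv]
  rfl
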